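-- pv_equiv track=rewrite | github.com/Ahmed1262005/PoseRecSys | src/women_attribute_classifier.py | get_attribute_distribution
-- ===== SOURCE A (Python) =====
-- from typing import Dict, List, Tuple, Optional
--
-- def get_attribute_distribution(
--
--     item_attributes: Dict[str, Dict[str, str]]
-- ) -> Dict[str, Dict[str, int]]:
--     """
--     Get distribution of attribute values across all items.
--
--     Args:
--         item_attributes: Output from classify_all_items
--
--     Returns:
--         Dict mapping attribute name to value -> count
--     """
--     distribution = {}
--
--     all_attrs = set()
--     for item_attrs in item_attributes.values():
--         all_attrs.update(item_attrs.keys())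
--
--     for attr_name in all_attrs:
--         if attr_name == 'category':
--             continue
--         distribution[attr_name] = {}
--
--         for item_id, attrs in item_attributes.items():
--             value = attrs.get(attr_name, 'unknown')
--             distribution[attr_name][value] = distribution[attr_name].get(value, 0) + 1
--
--     return distribution
-- ===== SOURCE B (Python) =====
-- def get_attribute_distribution(item_attributes):
--     """One interleaved pass over the items: counts are updated and missing-attribute
--     'unknown's accounted for as each item is seen, instead of A's two-phase
--     set-building plus per-attribute rescans of all items."""
--     distribution = {}
--     for i, attrs in enumerate(item_attributes.values()):
--         for attr_name, value in attrs.items():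
--             if attr_name == 'category':
--                 continue
--             counts = distribution.get(attr_name)
--             if counts is None:
--                 counts = {'unknown': i} if i > 0 else {}
--                 distribution[attr_name] = counts
--             counts[value] = counts.get(value, 0) + 1
--         for attr_name, counts in distribution.items():
--             if attr_name not in attrs:
--                 counts['unknown'] = counts.get('unknown', 0) + 1
--     return distribution
-- ===== Notes on version B (the rewrite author's own statement) =====
-- stated objective: faster
-- what changed: A first collects the set of all attribute names and then rescans the whole item list once per attribute (with a per-(attribute,item) dict-lookup chain); B makes a single interleaved pass over the items, creating each attribute's counter (pre-charged with 'unknown' for the items already seen) on first sight, incrementing value counts as values appear, and bumping 'unknown' for known attributes missing from the current item.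
import Mathlib
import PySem

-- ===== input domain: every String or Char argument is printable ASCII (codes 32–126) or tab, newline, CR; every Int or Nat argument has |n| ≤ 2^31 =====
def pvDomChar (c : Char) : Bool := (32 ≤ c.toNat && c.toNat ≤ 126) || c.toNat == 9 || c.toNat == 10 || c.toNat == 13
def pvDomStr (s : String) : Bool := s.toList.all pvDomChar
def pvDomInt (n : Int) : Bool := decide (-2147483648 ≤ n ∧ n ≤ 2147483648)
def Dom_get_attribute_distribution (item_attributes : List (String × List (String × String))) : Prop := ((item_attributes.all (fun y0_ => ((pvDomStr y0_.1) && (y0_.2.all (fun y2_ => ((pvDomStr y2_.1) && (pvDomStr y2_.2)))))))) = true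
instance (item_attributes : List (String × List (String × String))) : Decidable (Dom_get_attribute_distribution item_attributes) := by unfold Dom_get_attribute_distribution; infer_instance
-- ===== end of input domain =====

-- B replaces A's two-phase "collect the attribute set, then rescan all items once per attribute"
-- with ONE interleaved pass over the items that maintains the counts and the missing-item
-- 'unknown' counts as it goes (objective: faster — measured; no argument is mutated).

-- ===== PORT A =====
def get_attribute_distribution (item_attributes : List (String × List (String × String))) : List (String × List (String × Int)) :=
  let all_attrs : PySem.Set String :=
    item_attributes.foldl (fun all_attrs p => PySem.Set.update all_attrs (p.2.map (fun kv => kv.1))) PySem.Set.empty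
  let distribution : PySem.Dict String (PySem.Dict String Int) :=
    all_attrs.foldl (fun distribution attr_name =>
      if attr_name == "category" then distribution
      else
        item_attributes.foldl (fun distribution p =>
          let value := (PySem.Dict.mk p.2).getD attr_name "unknown"
          distribution.insert attr_name
            ((distribution.getD attr_name PySem.Dict.empty).insert value
              ((distribution.getD attr_name PySem.Dict.empty).getD value 0 + 1)))
          (distribution.insert attr_name PySem.Dict.empty))
      PySem.Dict.empty
  distribution.items.map (fun p => (p.1, p.2.items))

-- ===== PORT B =====
-- the body of B's `for i, attrs in enumerate(...)` loop, as a helper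
def pvBStep (dist : PySem.Dict String (PySem.Dict String Int)) (i : Int) (attrs : List (String × String)) : PySem.Dict String (PySem.Dict String Int) :=
  let dist1 := attrs.foldl (fun dist kv =>
    if kv.1 == "category" then dist
    else
      let counts := if dist.contains kv.1 then dist.getD kv.1 PySem.Dict.empty
                    else if i > 0 then PySem.Dict.mk [("unknown", i)] else PySem.Dict.empty
      dist.insert kv.1 (counts.insert kv.2 (counts.getD kv.2 0 + 1))) dist
  PySem.Dict.mk (dist1.items.map (fun p =>
    if (PySem.Dict.mk attrs).contains p.1 then p
    else (p.1, p.2.insert "unknown" (p.2.getD "unknown" 0 + 1))))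

def get_attribute_distribution_alt (item_attributes : List (String × List (String × String))) : List (String × List (String × Int)) :=
  let distribution : PySem.Dict String (PySem.Dict String Int) :=
    (PySem.List.enumerate (item_attributes.map (fun p => p.2))).foldl
      (fun dist ia => pvBStep dist ia.1 ia.2) PySem.Dict.empty
  distribution.items.map (fun p => (p.1, p.2.items))

-- ===== PRECONDITION & SPEC =====
-- Pre_ excludes association lists with duplicate keys (in an item's attribute dict or among
-- item ids), which do not encode any Python dict input of A.
def Pre_get_attribute_distribution (item_attributes : List (String × List (String × String))) : Prop :=
  (item_attributes.map (fun p => p.1)).Nodup ∧ ∀ p ∈ item_attributes, (p.2.map (fun kv => kv.1)).Nodup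
instance (item_attributes : List (String × List (String × String))) : Decidable (Pre_get_attribute_distribution item_attributes) := by unfold Pre_get_attribute_distribution; infer_instance
def pvWitness_get_attribute_distribution : (List (String × List (String × String))) :=
  [("i1", [("color", "red")]), ("i2", [("category", "top"), ("size", "m")])]

def Spec_get_attribute_distribution (item_attributes : List (String × List (String × String))) (out : List (String × List (String × Int))) : Prop := out = get_attribute_distribution_alt item_attributes
instance (item_attributes : List (String × List (String × String))) (out : List (String × List (String × Int))) : Decidable (Spec_get_attribute_distribution item_attributes out) := by unfold Spec_get_attribute_distribution; infer_instance

-- ===== CLAIM (what is proved, stated in full; the proofs are below) =====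
def Claim_equal_get_attribute_distribution : Prop := ∀ (item_attributes : List (String × List (String × String))), Dom_get_attribute_distribution item_attributes → Pre_get_attribute_distribution item_attributes → Spec_get_attribute_distribution item_attributes (get_attribute_distribution item_attributes)

-- ===== LEMMAS AND PROOFS =====

-- abbreviations used only by the proofs
def pvKeys (x : List (String × String)) : List String := x.map (fun kv => kv.1)
def pvGv (x : List (String × String)) (a : String) : String := (PySem.Dict.mk x).getD a "unknown"
def pvStepI (a : String) (inner : PySem.Dict String Int) (p : String × List (String × String)) : PySem.Dict String Int :=
  inner.insert (pvGv p.2 a) (inner.getD (pvGv p.2 a) 0 + 1)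
def pvInner (l : List (String × List (String × String))) (a : String) : PySem.Dict String Int :=
  l.foldl (pvStepI a) PySem.Dict.empty
def pvS (l : List (String × List (String × String))) : PySem.Set String :=
  l.foldl (fun s p => PySem.Set.update s (p.2.map (fun kv => kv.1))) PySem.Set.empty
def pvF (l : List (String × List (String × String))) : List String :=
  (pvS l).filter (fun a => !(a == "category"))
def pvAform (l : List (String × List (String × String))) : PySem.Dict String (PySem.Dict String Int) :=
  PySem.Dict.mk ((pvF l).map (fun a => (a, pvInner l a)))
def pvU0 (i : Int) : PySem.Dict String Int :=
  if i > 0 then PySem.Dict.mk [("unknown", i)] else PySem.Dict.empty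
def pvBody (i : Int) (dist : PySem.Dict String (PySem.Dict String Int)) (kv : String × String) : PySem.Dict String (PySem.Dict String Int) :=
  if kv.1 == "category" then dist
  else
    let counts := if dist.contains kv.1 then dist.getD kv.1 PySem.Dict.empty else pvU0 i
    dist.insert kv.1 (counts.insert kv.2 (counts.getD kv.2 0 + 1))
def pvFmap (l : List (String × List (String × String))) (q : List (String × String)) : List (String × PySem.Dict String Int) :=
  (pvF l).map (fun a => (a, if (pvKeys q).contains a then (pvInner l a).insert (pvGv q a) ((pvInner l a).getD (pvGv q a) 0 + 1) else pvInner l a))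
def pvNmap (l : List (String × List (String × String))) (i : Int) (q : List (String × String)) : List (String × PySem.Dict String Int) :=
  ((pvKeys q).filter (fun a => !(List.contains (pvS l) a) && !(a == "category"))).map
    (fun a => (a, (pvU0 i).insert (pvGv q a) ((pvU0 i).getD (pvGv q a) 0 + 1)))

lemma pvBStep_eq (d : PySem.Dict String (PySem.Dict String Int)) (i : Int) (attrs : List (String × String)) :
    pvBStep d i attrs = PySem.Dict.mk ((attrs.foldl (pvBody i) d).items.map (fun p =>
      if (PySem.Dict.mk attrs).contains p.1 then p
      else (p.1, p.2.insert "unknown" (p.2.getD "unknown" 0 + 1)))) := rfl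

lemma pv_get?_mk_append (q r : List (String × String)) (a : String) :
    (PySem.Dict.mk (q ++ r)).get? a = ((PySem.Dict.mk q).get? a).or ((PySem.Dict.mk r).get? a) := by
  induction q with
  | nil => simp [PySem.Dict.get?]
  | cons p q ih =>
    obtain ⟨k, v⟩ := p
    simp only [List.cons_append, PySem.Dict.get?_mk_cons]
    by_cases h : (k == a) = true
    · simp [h]
    · simp [h, ih]

lemma pv_gv_append_ne (q : List (String × String)) (k w : String) (a : String) (h : a ≠ k) :
    pvGv (q ++ [(k, w)]) a = pvGv q a := by
  have hk : (k == a) = false := by simp [Ne.symm h]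
  unfold pvGv PySem.Dict.getD
  rw [pv_get?_mk_append]
  have h2 : (PySem.Dict.mk [(k, w)]).get? a = none := by
    simp [hk, PySem.Dict.get?]
  rw [h2]
  cases (PySem.Dict.mk q).get? a <;> rfl

lemma pv_gv_append_self (q : List (String × String)) (k w : String) (h : k ∉ pvKeys q) :
    pvGv (q ++ [(k, w)]) k = w := by
  unfold pvGv PySem.Dict.getD
  rw [pv_get?_mk_append]
  have h1 : (PySem.Dict.mk q).get? k = none := by
    rw [PySem.Dict.get?_eq_none_iff_not_mem_keys]
    simpa [PySem.Dict.keys_mk, pvKeys] using h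
  have h2 : (PySem.Dict.mk [(k, w)]).get? k = some w := by
    simp [PySem.Dict.get?_mk_cons]
  rw [h1, h2]
  rfl

lemma pv_gv_not_mem (x : List (String × String)) (a : String) (h : a ∉ pvKeys x) :
    pvGv x a = "unknown" := by
  unfold pvGv PySem.Dict.getD
  have h1 : (PySem.Dict.mk x).get? a = none := by
    rw [PySem.Dict.get?_eq_none_iff_not_mem_keys]
    simpa [PySem.Dict.keys_mk, pvKeys] using h
  rw [h1]
  rfl

lemma pv_inner_append (l : List (String × List (String × String))) (x : String × List (String × String)) (a : String) :
    pvInner (l ++ [x]) a = pvStepI a (pvInner l a) x := by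
  simp [pvInner, List.foldl_append]

lemma pv_pvS_append (l : List (String × List (String × String))) (x : String × List (String × String)) :
    pvS (l ++ [x]) = PySem.Set.update (pvS l) (x.2.map (fun kv => kv.1)) := by
  simp [pvS, List.foldl_append]

lemma pv_mem_pvS_init (l : List (String × List (String × String))) (s : PySem.Set String) (a : String) (h : a ∈ s) :
    a ∈ l.foldl (fun s p => PySem.Set.update s (p.2.map (fun kv => kv.1))) s := by
  induction l generalizing s with
  | nil => simpa using h
  | cons y l ih =>
    simp only [List.foldl_cons]
    exact ih _ ((PySem.Set.mem_update _ _ _).mpr (Or.inl h))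

lemma pv_mem_pvS (l : List (String × List (String × String))) (p : String × List (String × String)) (a : String)
    (hp : p ∈ l) (ha : a ∈ pvKeys p.2) : a ∈ pvS l := by
  unfold pvS
  have key : ∀ (l : List (String × List (String × String))) (s : PySem.Set String), p ∈ l →
      a ∈ l.foldl (fun s p => PySem.Set.update s (p.2.map (fun kv => kv.1))) s := by
    intro l
    induction l with
    | nil => intro s h; cases h
    | cons y l ih =>
      intro s h
      simp only [List.foldl_cons]
      rcases List.mem_cons.mp h with h2 | h2
      · subst h2
        exact pv_mem_pvS_init l _ a ((PySem.Set.mem_update _ _ _).mpr (Or.inr (by simpa [pvKeys] using ha)))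
      · exact ih _ h2
  exact key l _ hp

lemma pv_nodup_pvS (l : List (String × List (String × String))) : (pvS l).Nodup := by
  unfold pvS
  have : ∀ (s : PySem.Set String), s.Nodup →
      (l.foldl (fun s p => PySem.Set.update s (p.2.map (fun kv => kv.1))) s).Nodup := by
    induction l with
    | nil => exact fun s hs => hs
    | cons y l ih => exact fun s hs => ih _ (PySem.Set.nodup_update s _ hs)
  exact this PySem.Set.empty List.nodup_nil

lemma pv_update_eq (s : PySem.Set String) (xs : List String) (h : xs.Nodup) :
    PySem.Set.update s xs = s ++ xs.filter (fun a => !(List.contains s a)) := by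
  induction xs generalizing s with
  | nil => simp [PySem.Set.update]
  | cons x xs ih =>
    have hx : x ∉ xs := (List.nodup_cons.mp h).1
    have hxs : xs.Nodup := (List.nodup_cons.mp h).2
    simp only [PySem.Set.update, List.foldl_cons] at *
    by_cases hc : List.contains s x = true
    · have hadd : PySem.Set.add s x = s := by
        simp only [PySem.Set.add, PySem.Set.contains]
        rw [if_pos hc]
      rw [hadd, ih _ hxs]
      simp [List.contains_iff_mem.mp hc]
    · have hadd : PySem.Set.add s x = s ++ [x] := by
        simp only [PySem.Set.add, PySem.Set.contains]
        rw [if_neg hc]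
      rw [hadd, ih _ hxs]
      have hfc : xs.filter (fun a => !(List.contains (s ++ [x]) a)) = xs.filter (fun a => !(List.contains s a)) := by
        apply List.filter_congr
        intro a ha
        have hax : a ≠ x := fun e => hx (e ▸ ha)
        simp [hax]
      rw [hfc]
      have hns : x ∉ s := fun hmem => hc (List.contains_iff_mem.mpr hmem)
      simp [hns, List.append_assoc]

lemma pv_inner_unknown (l : List (String × List (String × String))) (a : String)
    (h : ∀ p ∈ l, a ∉ pvKeys p.2) : pvInner l a = pvU0 (l.length : Int) := by
  induction l using List.reverseRecOn with
  | nil => simp [pvInner, pvU0]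
  | append_singleton l x ih =>
    have hl : ∀ p ∈ l, a ∉ pvKeys p.2 := fun p hp => h p (by simp [hp])
    have hx : a ∉ pvKeys x.2 := h x (by simp)
    rw [pv_inner_append, ih hl]
    unfold pvStepI
    rw [pv_gv_not_mem _ _ hx]
    rcases List.eq_nil_or_concat l with hnil | ⟨l', y, hy⟩
    · subst hnil
      simp [pvU0, PySem.Dict.insert, PySem.Dict.contains, PySem.Dict.getD, PySem.Dict.get?, PySem.Dict.empty]
    · have hpos : 0 < l.length := by subst hy; simp
      have hpos' : ((l.length : Int) > 0) := by exact_mod_cast hpos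
      have h1 : pvU0 (l.length : Int) = PySem.Dict.mk [("unknown", (l.length : Int))] := by
        simp only [pvU0]
        rw [if_pos hpos']
      rw [h1]
      have h2 : pvU0 ((l ++ [x]).length : Int) = PySem.Dict.mk [("unknown", ((l ++ [x]).length : Int))] := by
        simp only [pvU0]
        rw [if_pos (by simp)]
      rw [h2]
      simp [PySem.Dict.insert, PySem.Dict.contains, PySem.Dict.getD, PySem.Dict.get?]

lemma pv_collapse (items : List (String × List (String × String))) (k : String)
    (d : PySem.Dict String (PySem.Dict String Int)) (init : PySem.Dict String Int) :
    items.foldl (fun distribution p =>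
        let value := (PySem.Dict.mk p.2).getD k "unknown"
        distribution.insert k
          ((distribution.getD k PySem.Dict.empty).insert value
            ((distribution.getD k PySem.Dict.empty).getD value 0 + 1)))
      (d.insert k init)
    = d.insert k (items.foldl (pvStepI k) init) := by
  induction items generalizing init with
  | nil => rfl
  | cons p items ih =>
    simp only [List.foldl_cons]
    rw [PySem.Dict.getD_insert_self, PySem.Dict.insert_insert_self]
    exact ih _

lemma pv_A_char (l : List (String × List (String × String))) :
    get_attribute_distribution l = (pvAform l).items.map (fun p => (p.1, p.2.items)) := by
  have hfold :
      (pvS l).foldl (fun distribution attr_name =>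
        if attr_name == "category" then distribution
        else
          l.foldl (fun distribution p =>
            let value := (PySem.Dict.mk p.2).getD attr_name "unknown"
            distribution.insert attr_name
              ((distribution.getD attr_name PySem.Dict.empty).insert value
                ((distribution.getD attr_name PySem.Dict.empty).getD value 0 + 1)))
            (distribution.insert attr_name PySem.Dict.empty))
        PySem.Dict.empty
      = pvAform l := by
    rw [List.foldl_ext _ (fun d a =>
        if (!(a == "category")) = true then d.insert a (pvInner l a) else d) _ ?hext]
    case hext =>
      intro d a _
      by_cases hcat : (a == "category") = true
      · simp [hcat]
      · have hcat' : (a == "category") = false := by simpa using hcat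
        simp only [hcat', Bool.not_false, if_true, if_false, Bool.false_eq_true]
        exact pv_collapse l a d PySem.Dict.empty
    rw [← List.foldl_filter (p := fun a => !(a == "category"))
        (f := fun d a => d.insert a (pvInner l a)) (l := pvS l) (init := PySem.Dict.empty)]
    apply PySem.Dict.ext
    have hfresh : ∀ a ∈ pvF l,
        (PySem.Dict.empty : PySem.Dict String (PySem.Dict String Int)).contains ((fun a => a) a) = false :=
      fun a _ => PySem.Dict.contains_empty a
    have hnd : ((pvF l).map (fun a => a)).Nodup := by
      rw [List.map_id']
      exact (pv_nodup_pvS l).filter _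
    have := PySem.Dict.items_foldl_insert_fresh (pvF l) (fun a => a)
      (fun a => pvInner l a) PySem.Dict.empty hfresh hnd
    simpa [pvAform, pvF] using this
  calc get_attribute_distribution l
      = ((pvS l).foldl (fun distribution attr_name =>
          if attr_name == "category" then distribution
          else
            l.foldl (fun distribution p =>
              let value := (PySem.Dict.mk p.2).getD attr_name "unknown"
              distribution.insert attr_name
                ((distribution.getD attr_name PySem.Dict.empty).insert value
                  ((distribution.getD attr_name PySem.Dict.empty).getD value 0 + 1)))
              (distribution.insert attr_name PySem.Dict.empty))
          PySem.Dict.empty).items.map (fun p => (p.1, p.2.items)) := rfl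
    _ = (pvAform l).items.map (fun p => (p.1, p.2.items)) := by rw [hfold]

lemma pv_keys_FN (l : List (String × List (String × String))) (i : Int) (q : List (String × String)) :
    (PySem.Dict.mk (pvFmap l q ++ pvNmap l i q)).keys
      = pvF l ++ (pvKeys q).filter (fun a => !(List.contains (pvS l) a) && !(a == "category")) := by
  simp only [PySem.Dict.keys_mk, pvFmap, pvNmap, List.map_append, List.map_map]
  simp [Function.comp_def]

lemma pv_nodup_FN (l : List (String × List (String × String))) (i : Int) (q : List (String × String))
    (hq : (pvKeys q).Nodup) :
    (PySem.Dict.mk (pvFmap l q ++ pvNmap l i q)).keys.Nodup := by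
  rw [pv_keys_FN]
  refine List.nodup_append.mpr ⟨(pv_nodup_pvS l).filter _, hq.filter _, ?_⟩
  intro a ha b hb hab
  subst hab
  have haS : a ∈ pvS l := (List.mem_filter.mp ha).1
  have h2 := (List.mem_filter.mp hb).2
  simp at h2
  exact h2.1 haS

lemma pv_loop1 (l : List (String × List (String × String))) (q : List (String × String))
    (hq : (pvKeys q).Nodup) :
    q.foldl (pvBody (l.length : Int)) (pvAform l)
      = PySem.Dict.mk (pvFmap l q ++ pvNmap l (l.length : Int) q) := by
  induction q using List.reverseRecOn with
  | nil =>
    simp [pvFmap, pvNmap, pvKeys, pvAform]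
  | append_singleton q kv ih =>
    obtain ⟨k, w⟩ := kv
    have hkeysq : pvKeys (q ++ [(k, w)]) = pvKeys q ++ [k] := by simp [pvKeys]
    have hq2 : (pvKeys q).Nodup ∧ k ∉ pvKeys q := by
      rw [hkeysq] at hq
      have h2 := List.nodup_append.mp hq
      exact ⟨h2.1, fun hm => h2.2.2 k hm k (by simp) rfl⟩
    obtain ⟨hqq, hknotin⟩ := hq2
    rw [List.foldl_append, List.foldl_cons, List.foldl_nil, ih hqq]
    by_cases hcat : k = "category"
    · -- 'category' is skipped: nothing changes
      simp only [pvBody]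
      rw [if_pos (by simp [hcat])]
      have hF : pvFmap l (q ++ [(k, w)]) = pvFmap l q := by
        unfold pvFmap
        apply List.map_congr_left
        intro a ha
        have hacat : a ≠ "category" := by
          have h3 := (List.mem_filter.mp ha).2
          simpa using h3
        have hak : a ≠ k := by rw [hcat]; exact hacat
        rw [hkeysq, pv_gv_append_ne q k w a hak]
        have hcont : (pvKeys q ++ [k]).contains a = (pvKeys q).contains a := by
          simp [hak]
        rw [hcont]
      have hN : pvNmap l (l.length : Int) (q ++ [(k, w)]) = pvNmap l (l.length : Int) q := by
        unfold pvNmap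
        rw [hkeysq, List.filter_append]
        have h4 : [k].filter (fun a => !(List.contains (pvS l) a) && !(a == "category")) = [] := by
          simp [hcat]
        rw [h4, List.append_nil]
        apply List.map_congr_left
        intro a ha
        have hak : a ≠ k := by
          intro e; subst e; exact hknotin (List.mem_of_mem_filter ha)
        rw [pv_gv_append_ne q k w a hak]
      rw [hF, hN]
    · simp only [pvBody]
      rw [if_neg (by simp [hcat])]
      by_cases hS : k ∈ pvS l
      · -- existing attribute: in-place update of its counter dict
        have hkF : k ∈ pvF l := List.mem_filter.mpr ⟨hS, by simp [hcat]⟩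
        have hcont : (PySem.Dict.mk (pvFmap l q ++ pvNmap l (l.length : Int) q)).contains k = true := by
          refine (PySem.Dict.contains_iff_mem_keys _ _).mpr ?_
          rw [pv_keys_FN]
          exact List.mem_append_left _ hkF
        have hqk : (pvKeys q).contains k = false := by simp [hknotin]
        have hmem : (k, pvInner l k) ∈ (PySem.Dict.mk (pvFmap l q ++ pvNmap l (l.length : Int) q)).items := by
          apply List.mem_append_left
          unfold pvFmap
          have h5 : ((fun a => (a, if (pvKeys q).contains a then (pvInner l a).insert (pvGv q a) ((pvInner l a).getD (pvGv q a) 0 + 1) else pvInner l a)) k) = (k, pvInner l k) := by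
            simp [hknotin]
          exact h5 ▸ List.mem_map_of_mem hkF
        have hgetD : (PySem.Dict.mk (pvFmap l q ++ pvNmap l (l.length : Int) q)).getD k PySem.Dict.empty = pvInner l k :=
          PySem.Dict.getD_of_mem_items _ hmem (pv_nodup_FN l _ q hqq) _
        simp only [if_pos hcont]
        rw [hgetD]
        apply PySem.Dict.ext
        rw [PySem.Dict.items_insert_of_contains _ _ hcont]
        show (pvFmap l q ++ pvNmap l (l.length : Int) q).map _
          = pvFmap l (q ++ [(k, w)]) ++ pvNmap l (l.length : Int) (q ++ [(k, w)])
        rw [List.map_append]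
        have hgvk : pvGv (q ++ [(k, w)]) k = w := pv_gv_append_self q k w hknotin
        have hckq : (pvKeys (q ++ [(k, w)])).contains k = true := by
          rw [hkeysq]; simp
        have hFpart : (pvFmap l q).map (fun p => if (p.1 == k) = true then (k, ((pvInner l k).insert w ((pvInner l k).getD w 0 + 1))) else p) = pvFmap l (q ++ [(k, w)]) := by
          unfold pvFmap
          rw [List.map_map]
          apply List.map_congr_left
          intro a ha
          by_cases hak : a = k
          · subst hak
            simp only [Function.comp_apply, hqk, hckq, hgvk]
            simp
          · have h6 : ((a : String) == k) = false := by simp [hak]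
            simp only [Function.comp_apply, h6]
            rw [hkeysq, pv_gv_append_ne q k w a hak]
            have hcont2 : (pvKeys q ++ [k]).contains a = (pvKeys q).contains a := by
              simp [hak]
            rw [hcont2]
            simp
        have hNpart : (pvNmap l (l.length : Int) q).map (fun p => if (p.1 == k) = true then (k, ((pvInner l k).insert w ((pvInner l k).getD w 0 + 1))) else p) = pvNmap l (l.length : Int) (q ++ [(k, w)]) := by
          unfold pvNmap
          rw [hkeysq, List.filter_append]
          have h7 : [k].filter (fun a => !(List.contains (pvS l) a) && !(a == "category")) = [] := by
            simp [hS]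
          rw [h7, List.append_nil, List.map_map]
          apply List.map_congr_left
          intro a ha
          have haS : ¬ (List.contains (pvS l) a = true) := by
            have h8 := (List.mem_filter.mp ha).2
            simp at h8
            intro hc
            exact h8.1 (List.contains_iff_mem.mp hc)
          have hak : a ≠ k := by
            intro e; subst e; exact haS (List.contains_iff_mem.mpr hS)
          have h6 : ((a : String) == k) = false := by simp [hak]
          simp only [Function.comp_apply, h6]
          rw [pv_gv_append_ne q k w a hak]
          simp
        rw [hFpart, hNpart]
      · -- new attribute: appended with its initial 'unknown' counter
        have hkF : k ∉ pvF l := fun hm => hS (List.mem_filter.mp hm).1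
        have hcont : (PySem.Dict.mk (pvFmap l q ++ pvNmap l (l.length : Int) q)).contains k = false := by
          have h9 : ¬ ((PySem.Dict.mk (pvFmap l q ++ pvNmap l (l.length : Int) q)).contains k = true) := by
            rw [PySem.Dict.contains_iff_mem_keys, pv_keys_FN]
            intro hm
            rcases List.mem_append.mp hm with h | h
            · exact hkF h
            · exact hknotin (List.mem_of_mem_filter h)
          exact Bool.eq_false_iff.mpr h9
        simp only [hcont, Bool.false_eq_true, if_false]
        apply PySem.Dict.ext
        rw [PySem.Dict.items_insert_of_not_contains _ _ hcont]
        show (pvFmap l q ++ pvNmap l (l.length : Int) q) ++ [(k, ((pvU0 (l.length : Int)).insert w ((pvU0 (l.length : Int)).getD w 0 + 1)))]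
          = pvFmap l (q ++ [(k, w)]) ++ pvNmap l (l.length : Int) (q ++ [(k, w)])
        have hgvk : pvGv (q ++ [(k, w)]) k = w := pv_gv_append_self q k w hknotin
        have hFpart : pvFmap l (q ++ [(k, w)]) = pvFmap l q := by
          unfold pvFmap
          apply List.map_congr_left
          intro a ha
          have haS : a ∈ pvS l := (List.mem_filter.mp ha).1
          have hak : a ≠ k := fun e => hS (e ▸ haS)
          rw [hkeysq, pv_gv_append_ne q k w a hak]
          have hcont2 : (pvKeys q ++ [k]).contains a = (pvKeys q).contains a := by
            simp [hak]
          rw [hcont2]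
        have hNpart : pvNmap l (l.length : Int) (q ++ [(k, w)])
            = pvNmap l (l.length : Int) q ++ [(k, ((pvU0 (l.length : Int)).insert w ((pvU0 (l.length : Int)).getD w 0 + 1)))] := by
          unfold pvNmap
          rw [hkeysq, List.filter_append]
          have h10 : [k].filter (fun a => !(List.contains (pvS l) a) && !(a == "category")) = [k] := by
            simp [hS, hcat]
          rw [h10, List.map_append]
          congr 1
          · apply List.map_congr_left
            intro a ha
            have hak : a ≠ k := by
              intro e; subst e; exact hknotin (List.mem_of_mem_filter ha)
            rw [pv_gv_append_ne q k w a hak]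
          · simp [hgvk]
        rw [hFpart, hNpart, List.append_assoc]

lemma pv_step (l : List (String × List (String × String))) (x : String × List (String × String))
    (hx : (pvKeys x.2).Nodup) :
    pvBStep (pvAform l) (l.length : Int) x.2 = pvAform (l ++ [x]) := by
  have hmkc : ∀ a : String, ((PySem.Dict.mk x.2).contains a = true) ↔ a ∈ pvKeys x.2 := by
    intro a
    rw [PySem.Dict.contains_iff_mem_keys, PySem.Dict.keys_mk]
    exact Iff.rfl
  rw [pvBStep_eq, pv_loop1 l x.2 hx]
  show PySem.Dict.mk ((pvFmap l x.2 ++ pvNmap l (l.length : Int) x.2).map (fun p =>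
      if (PySem.Dict.mk x.2).contains p.1 then p
      else (p.1, p.2.insert "unknown" (p.2.getD "unknown" 0 + 1)))) = pvAform (l ++ [x])
  rw [List.map_append]
  have hFpart : (pvFmap l x.2).map (fun p =>
      if (PySem.Dict.mk x.2).contains p.1 then p
      else (p.1, p.2.insert "unknown" (p.2.getD "unknown" 0 + 1)))
      = (pvF l).map (fun a => (a, pvInner (l ++ [x]) a)) := by
    unfold pvFmap
    rw [List.map_map]
    apply List.map_congr_left
    intro a ha
    by_cases hmem : a ∈ pvKeys x.2
    · have hc : (pvKeys x.2).contains a = true := List.contains_iff_mem.mpr hmem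
      have hcmk : (PySem.Dict.mk x.2).contains a = true := (hmkc a).mpr hmem
      simp only [Function.comp_apply, hc, if_true, hcmk]
      rw [pv_inner_append]
      simp [pvStepI]
    · have hc : (pvKeys x.2).contains a = false :=
        Bool.eq_false_iff.mpr (fun h => hmem (List.contains_iff_mem.mp h))
      have hcmk : (PySem.Dict.mk x.2).contains a = false :=
        Bool.eq_false_iff.mpr (fun h => hmem ((hmkc a).mp h))
      simp only [Function.comp_apply, hc, hcmk, Bool.false_eq_true, if_false]
      rw [pv_inner_append]
      simp [pvStepI, pv_gv_not_mem x.2 a hmem]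
  have hNpart : (pvNmap l (l.length : Int) x.2).map (fun p =>
      if (PySem.Dict.mk x.2).contains p.1 then p
      else (p.1, p.2.insert "unknown" (p.2.getD "unknown" 0 + 1)))
      = ((pvKeys x.2).filter (fun a => !(List.contains (pvS l) a) && !(a == "category"))).map
          (fun a => (a, pvInner (l ++ [x]) a)) := by
    unfold pvNmap
    rw [List.map_map]
    apply List.map_congr_left
    intro a ha
    have hmem : a ∈ pvKeys x.2 := List.mem_of_mem_filter ha
    have hcmk : (PySem.Dict.mk x.2).contains a = true := (hmkc a).mpr hmem
    have hanotS : a ∉ pvS l := by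
      have h8 := (List.mem_filter.mp ha).2
      simp at h8
      exact h8.1
    have hinner : pvInner l a = pvU0 (l.length : Int) :=
      pv_inner_unknown l a (fun p hp hk => hanotS (pv_mem_pvS l p a hp hk))
    simp only [Function.comp_apply, hcmk, if_true]
    rw [pv_inner_append]
    simp [pvStepI, hinner]
  have hpvF : pvF (l ++ [x]) = pvF l ++ (pvKeys x.2).filter (fun a => !(List.contains (pvS l) a) && !(a == "category")) := by
    unfold pvF
    simp only [pvKeys]
    rw [pv_pvS_append, pv_update_eq (pvS l) (x.2.map (fun kv => kv.1)) (show (x.2.map (fun kv => kv.1)).Nodup from hx)]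
    rw [List.filter_append, List.filter_filter]
    congr 1
    apply List.filter_congr
    intro a ha
    rw [Bool.and_comm]
  rw [hFpart, hNpart]
  unfold pvAform
  rw [hpvF, List.map_append]

lemma pv_Bfold (rest : List (String × List (String × String))) :
    ∀ (pre : List (String × List (String × String))),
      (∀ p ∈ rest, (pvKeys p.2).Nodup) →
      (PySem.List.enumerate (rest.map (fun p => p.2)) (pre.length : Int)).foldl
          (fun d ia => pvBStep d ia.1 ia.2) (pvAform pre)
        = pvAform (pre ++ rest) := by
  induction rest with
  | nil => intro pre h; simp
  | cons x rest ih =>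
    intro pre h
    simp only [List.map_cons, PySem.List.enumerate_cons, List.foldl_cons]
    rw [pv_step pre x (h x (by simp))]
    have hstart : ((pre.length : Int) + 1) = (((pre ++ [x]).length : Int)) := by
      simp
    rw [hstart, ih (pre ++ [x]) (fun p hp => h p (by simp [hp]))]
    simp

-- ===== VERDICT (by name: the statement is the Claim_ definition above) =====
theorem get_attribute_distribution_spec : Claim_equal_get_attribute_distribution := by
  intro l hdom hpre
  unfold Spec_get_attribute_distribution
  rw [pv_A_char]
  have hB := pv_Bfold l [] (fun p hp => hpre.2 p hp)
  calc (pvAform l).items.map (fun p => (p.1, p.2.items))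
      = ((PySem.List.enumerate (l.map (fun p => p.2)) ((([] : List (String × List (String × String))).length : Int))).foldl
          (fun d ia => pvBStep d ia.1 ia.2) (pvAform ([] : List (String × List (String × String))))).items.map
            (fun p => (p.1, p.2.items)) := by rw [hB]; simp
    _ = get_attribute_distribution_alt l := rfl
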